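-- pv_equiv track=rewrite | github.com/Time-Coder/Glass-Engine | glass/minifyc.py | process_trigraph
-- ===== SOURCE A (Python) =====
-- def process_trigraph(str):
--     trigraphs = {
--         '=': '#',
--         '/': '\\',
--         "'": '^',
--         '(': '[',
--         ')': ']',
--         '<': '{',
--         '>': '}',
--         '!': '|',
--         '-': '~'
--     }
--     for ch, replacement in trigraphs.items():
--         ret = ''
--         lst = 0
--         pattern = "??" + ch
--         while lst != len(str):
--             ind = str.find(pattern, lst)
--             if ind == -1:
--                 break
--             ret += str[lst:ind] + replacement
--             lst = ind + len(pattern)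
--         ret += str[lst:]
--         str = ret
--     return str
-- ===== SOURCE B (Python) =====
-- def process_trigraph(str):
--     trigraphs = {
--         '=': '#',
--         '/': '\\',
--         "'": '^',
--         '(': '[',
--         ')': ']',
--         '<': '{',
--         '>': '}',
--         '!': '|',
--         '-': '~'
--     }
--     out = []
--     i = 0
--     n = len(str)
--     while i < n:
--         if i + 2 < n and str[i] == '?' and str[i + 1] == '?' and str[i + 2] in trigraphs:
--             out.append(trigraphs[str[i + 2]])
--             i += 3
--         else:
--             out.append(str[i])
--             i += 1
--     return ''.join(out)
-- ===== Notes on version B (the rewrite author's own statement) =====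
-- stated objective: alternative
-- what changed: Replaces A's nine sequential whole-string find-and-splice passes (one per trigraph) with a single left-to-right scan that checks each three-character window against the trigraph table once and emits either the mapped replacement or the current character.
import Mathlib
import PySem

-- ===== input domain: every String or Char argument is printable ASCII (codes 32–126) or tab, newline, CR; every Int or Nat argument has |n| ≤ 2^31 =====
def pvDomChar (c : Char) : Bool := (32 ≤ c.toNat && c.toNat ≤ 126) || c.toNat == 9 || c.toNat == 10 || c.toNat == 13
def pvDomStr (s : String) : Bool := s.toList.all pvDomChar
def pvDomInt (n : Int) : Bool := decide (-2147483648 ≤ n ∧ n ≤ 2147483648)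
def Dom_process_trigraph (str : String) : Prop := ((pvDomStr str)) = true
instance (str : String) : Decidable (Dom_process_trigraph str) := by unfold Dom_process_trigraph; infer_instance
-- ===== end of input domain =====

-- B replaces A's nine sequential whole-string find-and-splice passes with one left-to-right scan.

-- the trigraph table of both Pythons (insertion order), as (key, replacement) characters
def pvTri : List (Char × Char) :=
  [('=', '#'), ('/', '\\'), ('\'', '^'), ('(', '['), (')', ']'),
   ('<', '{'), ('>', '}'), ('!', '|'), ('-', '~')]

-- ===== PORT A =====
-- str.find(sub, start) with start past the end of the string returns -1 (CPython rule);
-- cited by pvPassLoop's termination proof.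
theorem pvFindFrom_past (s sub : List Char) (k : Nat) (h : s.length < k) :
    PySem.Chars.findFrom s sub (k : Int) none = -1 := by
  simp only [PySem.Chars.findFrom]
  have h1 : ¬ ((k : Int) < 0) := by omega
  have h2 : (s.length : Int) < (k : Int) := by exact_mod_cast h
  simp only [if_neg h1, if_pos h2]

-- A's inner 'while lst != len(str)' loop for one pattern "??"+ch / one-char replacement rep;
-- str.find(pattern, lst) is PySem.Chars.findFrom, str[lst:ind] is PySem.List.slice.
def pvPassLoop (ch rep : Char) (s ret : List Char) (lst : Nat) : List Char :=
  if _hl : lst ≠ s.length then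
    let ind := PySem.Chars.findFrom s ['?', '?', ch] (lst : Int) none
    if hi : ind = -1 then ret ++ PySem.List.slice s (some (lst : Int)) none
    else
      pvPassLoop ch rep s
        (ret ++ PySem.List.slice s (some (lst : Int)) (some ind) ++ [rep]) (ind.toNat + 3)
  else ret ++ PySem.List.slice s (some (lst : Int)) none
termination_by s.length - lst
decreasing_by
  · have hlen : lst ≤ s.length := by
      by_contra h
      exact hi (pvFindFrom_past s ['?', '?', ch] lst (by omega))
    obtain ⟨h1, h2, -⟩ := PySem.Chars.findFrom_natCast_spec s ['?','?',ch] lst hlen hi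
    have hlen2 := h2.length_le
    simp at hlen2
    omega

def process_trigraph (str : String) : String :=
  String.ofList (pvTri.foldl (fun s p => pvPassLoop p.1 p.2 s [] 0) str.toList)

-- ===== PORT B =====
-- first-match lookup in the (literal, duplicate-free) trigraph dict
def pvLookup : List (Char × Char) → Char → Option Char
  | [], _ => none
  | (k, v) :: d, x => if x = k then some v else pvLookup d x

-- B's single scan: at each position, a '??' window whose third char is a key emits the
-- replacement and advances 3, otherwise the current char is emitted and the scan advances 1.
def pvScan (d : List (Char × Char)) : List Char → List Char
  | a :: b :: x :: t =>
      match (if a = '?' ∧ b = '?' then pvLookup d x else none) with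
      | some r => r :: pvScan d t
      | none => a :: pvScan d (b :: x :: t)
  | a :: t => a :: pvScan d t
  | [] => []

def process_trigraph_alt (str : String) : String :=
  String.ofList (pvScan pvTri str.toList)

-- ===== PRECONDITION & SPEC =====
def Spec_process_trigraph (str : String) (out : String) : Prop := out = process_trigraph_alt str
instance (str : String) (out : String) : Decidable (Spec_process_trigraph str out) := by unfold Spec_process_trigraph; infer_instance

-- ===== CLAIM (what is proved, stated in full; the proofs are below) =====
def Claim_equal_process_trigraph : Prop := ∀ (str : String), Dom_process_trigraph str → Spec_process_trigraph str (process_trigraph str)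

-- ===== LEMMAS AND PROOFS =====

-- one pass of A, as a direct recursion: replace "??c" by r, scanning left to right
def scanOne (c r : Char) : List Char → List Char
  | a :: b :: x :: t =>
      if a = '?' ∧ b = '?' ∧ x = c then r :: scanOne c r t
      else a :: scanOne c r (b :: x :: t)
  | a :: t => a :: scanOne c r t
  | [] => []

theorem pat_prefix_of (c a : Char) (m : List Char)
    (h : a = '?' ∧ m.head? = some '?' ∧ m.tail.head? = some c) :
    ['?', '?', c] <+: a :: m := by
  obtain ⟨ha, h1, h2⟩ := h
  cases m with
  | nil => simp at h1
  | cons b m' =>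
    simp at h1
    cases m' with
    | nil => simp at h2
    | cons x u =>
      simp at h2
      exact ⟨u, by simp [ha, h1, h2]⟩

theorem scanOne_cons (c r a : Char) (m : List Char)
    (h : ¬ (a = '?' ∧ m.head? = some '?' ∧ m.tail.head? = some c)) :
    scanOne c r (a :: m) = a :: scanOne c r m := by
  match m with
  | [] => simp [scanOne]
  | [b] => simp [scanOne]
  | b :: x :: t =>
    rw [scanOne, if_neg]
    rintro ⟨h1, h2, h3⟩
    exact h ⟨h1, by simp [h2], by simp [h3]⟩

theorem scanOne_no (c r : Char) : ∀ (l : List Char),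
    ¬ ['?', '?', c] <:+: l → scanOne c r l = l := by
  intro l
  induction l with
  | nil => intro _; rfl
  | cons a t ih =>
    intro h
    rw [List.infix_cons_iff] at h
    rw [scanOne_cons c r a t (fun hc => h (Or.inl (pat_prefix_of c a t hc))),
      ih (fun hi => h (Or.inr hi))]

theorem scanOne_first (c r : Char) : ∀ (k : ℕ) (l : List Char),
    ['?', '?', c] <+: l.drop k → (∀ i < k, ¬ ['?', '?', c] <+: l.drop i) →
    scanOne c r l = l.take k ++ r :: scanOne c r (l.drop (k + 3)) := by
  intro k
  induction k with
  | zero =>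
    intro l h1 _
    simp only [List.drop_zero] at h1
    obtain ⟨u, hu⟩ := h1
    subst hu
    simp [scanOne]
  | succ k ih =>
    intro l h1 h2
    match l with
    | [] => simp at h1
    | a :: t =>
      have hnp : ¬ ['?', '?', c] <+: a :: t := h2 0 (Nat.succ_pos _)
      rw [scanOne_cons c r a t (fun hc => hnp (pat_prefix_of c a t hc))]
      rw [ih t h1 (fun i hi => h2 (i + 1) (by omega))]
      simp [List.take_succ_cons]

-- A's find-loop computes the scan of the unprocessed suffix
theorem pass_eq (ch rep : Char) (s : List Char) : ∀ (fuel lst : ℕ) (ret : List Char),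
    s.length - lst ≤ fuel → lst ≤ s.length →
    pvPassLoop ch rep s ret lst = ret ++ scanOne ch rep (s.drop lst) := by
  intro fuel
  induction fuel with
  | zero =>
    intro lst ret hf hl
    have : lst = s.length := by omega
    subst this
    rw [pvPassLoop]
    simp [PySem.List.slice_from_natCast, scanOne]
  | succ fuel ih =>
    intro lst ret hf hl
    rw [pvPassLoop]
    by_cases he : lst = s.length
    · subst he
      simp [PySem.List.slice_from_natCast, scanOne]
    · rw [dif_pos he]
      by_cases hi : PySem.Chars.findFrom s ['?', '?', ch] (lst : Int) none = -1
      · rw [dif_pos hi]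
        have hninf := (PySem.Chars.findFrom_natCast_eq_neg_one_iff s ['?','?',ch] lst hl).mp hi
        rw [scanOne_no ch rep _ hninf, PySem.List.slice_from_natCast]
      · rw [dif_neg hi]
        obtain ⟨hge, hpre, hmin⟩ := PySem.Chars.findFrom_natCast_spec s ['?','?',ch] lst hl hi
        set ind := PySem.Chars.findFrom s ['?', '?', ch] (lst : Int) none with hind
        have hk3 : ind.toNat + 3 ≤ s.length := by
          have := hpre.length_le
          simp at this
          omega
        rw [ih (ind.toNat + 3) _ (by omega) hk3]
        have hlk : lst ≤ ind.toNat := by omega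
        rw [scanOne_first ch rep (ind.toNat - lst) (s.drop lst)
          (by rw [List.drop_drop, show lst + (ind.toNat - lst) = ind.toNat by omega]; exact hpre)
          (by intro i hilt
              rw [List.drop_drop]
              exact hmin (lst + i) (by omega) (by omega))]
        rw [PySem.List.slice_toNat s (by omega) (by omega)]
        rw [List.drop_drop, show lst + (ind.toNat - lst + 3) = ind.toNat + 3 by omega]
        simp

theorem pass0 (ch rep : Char) (l : List Char) :
    pvPassLoop ch rep l [] 0 = scanOne ch rep l := by
  simpa using pass_eq ch rep l l.length 0 [] (by omega) (by omega)

-- dict facts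
theorem pvLookup_mem : ∀ (d : List (Char × Char)) (x v : Char),
    pvLookup d x = some v → v ∈ d.map Prod.snd := by
  intro d
  induction d with
  | nil => intro x v h; simp [pvLookup] at h
  | cons p d ih =>
    intro x v h
    rw [pvLookup] at h
    by_cases hx : x = p.1
    · simp [hx] at h; simp [h]
    · rw [if_neg hx] at h
      simp [ih x v h]

theorem pvLookup_append (d : List (Char × Char)) (c r x : Char) :
    pvLookup (d ++ [(c, r)]) x =
      match pvLookup d x with
      | some v => some v
      | none => if x = c then some r else none := by
  induction d with
  | nil => simp [pvLookup]
  | cons p d ih =>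
    by_cases hx : x = p.1
    · simp [pvLookup, hx]
    · simp only [List.cons_append, pvLookup, if_neg hx, ih]

theorem pvScan_nil : ∀ (l : List Char), pvScan [] l = l := by
  intro l
  induction l with
  | nil => rfl
  | cons a t ih =>
    match t, ih with
    | [], _ => rfl
    | [b], _ => rfl
    | b :: x :: t', ih =>
      rw [pvScan]
      simp [pvLookup, ih]

theorem pvScan_head (d : List (Char × Char)) (u : Char) (w : List Char) :
    (pvScan d (u :: w)).head? = some u ∨
      ∃ v, (pvScan d (u :: w)).head? = some v ∧ v ∈ d.map Prod.snd := by
  match w with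
  | [] => left; rfl
  | [b] => left; rfl
  | b :: x :: t =>
    rw [pvScan]
    rcases hq : (if u = '?' ∧ b = '?' then pvLookup d x else none) with _ | v
    · left; rfl
    · right
      refine ⟨v, rfl, ?_⟩
      by_cases hc : u = '?' ∧ b = '?'
      · rw [if_pos hc] at hq; exact pvLookup_mem d x v hq
      · rw [if_neg hc] at hq; exact absurd hq (by simp)

theorem pvScan_cons_ne (d : List (Char × Char)) (u : Char) (w : List Char) (hu : u ≠ '?') :
    pvScan d (u :: w) = u :: pvScan d w := by
  match w with
  | [] => rfl
  | [b] => rfl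
  | b :: x :: t => rw [pvScan, if_neg (fun h => hu h.1)]

theorem pvScan_head_ne (d : List (Char × Char)) (z : Char)
    (hvz : ∀ v ∈ d.map Prod.snd, v ≠ z) (u : Char) (w : List Char) (hu : u ≠ z) :
    (pvScan d (u :: w)).head? ≠ some z := by
  rcases pvScan_head d u w with h | ⟨v, h, hm⟩
  · rw [h]; simp [hu]
  · rw [h]; simp [hvz v hm]

-- adding one more trigraph to the scan's table = running A's extra pass afterwards
theorem pvStep (c r : Char) (d : List (Char × Char)) (hc : c ≠ '?')
    (hv : ∀ v ∈ d.map Prod.snd, v ≠ '?' ∧ v ≠ c) :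
    ∀ (l : List Char), scanOne c r (pvScan d l) = pvScan (d ++ [(c, r)]) l := by
  have hla := pvLookup_append d c r
  have hvq : ∀ v ∈ d.map Prod.snd, v ≠ '?' := fun v h => (hv v h).1
  have hvc : ∀ v ∈ d.map Prod.snd, v ≠ c := fun v h => (hv v h).2
  intro l
  induction hn : l.length using Nat.strong_induction_on generalizing l with
  | _ n ih =>
  match l with
  | [] => simp [pvScan, scanOne]
  | [a] => simp [pvScan, scanOne]
  | [a, b] => simp [pvScan, scanOne]
  | a :: b :: x :: t =>
    have hlen : t.length < n := by simp at hn; omega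
    have hlen1 : (b :: x :: t).length < n := by simp at hn ⊢; omega
    by_cases hab : a = '?' ∧ b = '?'
    · rcases hx : pvLookup d x with _ | v
      · by_cases hxc : x = c
        · -- the new trigraph: B's table now fires where A's extra pass fired
          have hxq : x ≠ '?' := by rw [hxc]; exact hc
          have hK' : pvLookup (d ++ [(c, r)]) x = some r := by
            rw [hla x, hx]; simp [hxc]
          have hL : pvScan d (a :: b :: x :: t) = '?' :: '?' :: x :: pvScan d t := by
            match t with
            | [] => simp [pvScan, hab.1, hab.2, hx]
            | y :: t' =>
              have h1 : pvScan d (b :: x :: y :: t') = b :: pvScan d (x :: y :: t') := by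
                rw [pvScan, if_neg (fun h => hxq h.2)]
              simp [pvScan, hab.1, hab.2, hx, hxq, pvScan_cons_ne d x (y :: t') hxq]
          rw [hL]
          rw [scanOne, if_pos ⟨rfl, rfl, hxc⟩]
          rw [pvScan, if_pos hab, hK']
          rw [ih t.length hlen t rfl]
        · -- '??' window over a non-key: both scans advance one character
          have hK'x : pvLookup (d ++ [(c, r)]) x = none := by
            rw [hla x, hx]; simp [hxc]
          have hL : pvScan d (a :: b :: x :: t) = a :: pvScan d (b :: x :: t) := by
            rw [pvScan, if_pos hab, hx]
          have hR : pvScan (d ++ [(c, r)]) (a :: b :: x :: t)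
              = a :: pvScan (d ++ [(c, r)]) (b :: x :: t) := by
            rw [pvScan, if_pos hab, hK'x]
          have hm : ¬ (a = '?' ∧ (pvScan d (b :: x :: t)).head? = some '?' ∧
              (pvScan d (b :: x :: t)).tail.head? = some c) := by
            rintro ⟨-, h1, h2⟩
            match t with
            | [] =>
              have : pvScan d [b, x] = [b, x] := by simp [pvScan]
              rw [this] at h2
              simp at h2
              exact hxc h2
            | y :: t' =>
              by_cases hxq : x = '?'
              · rcases hy : pvLookup d y with _ | v
                · have : pvScan d (b :: x :: y :: t') = b :: pvScan d (x :: y :: t') := by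
                    rw [pvScan, if_pos ⟨hab.2, hxq⟩, hy]
                  rw [this] at h2
                  exact pvScan_head_ne d c hvc x (y :: t') (by rw [hxq]; exact Ne.symm hc) h2
                · have : pvScan d (b :: x :: y :: t') = v :: pvScan d t' := by
                    rw [pvScan, if_pos ⟨hab.2, hxq⟩, hy]
                  rw [this] at h1
                  simp at h1
                  exact hvq v (pvLookup_mem d y v hy) h1
              · have : pvScan d (b :: x :: y :: t') = b :: pvScan d (x :: y :: t') := by
                  rw [pvScan, if_neg (by rintro ⟨-, h⟩; exact hxq h)]
                rw [this] at h2
                exact pvScan_head_ne d c hvc x (y :: t') hxc h2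
          rw [hL, scanOne_cons c r a _ hm, hR, ih _ hlen1 _ rfl]
      · -- existing trigraph: both sides emit the stored replacement
        have hvv := hv v (pvLookup_mem d x v hx)
        have hK' : pvLookup (d ++ [(c, r)]) x = some v := by rw [hla x, hx]
        rw [pvScan, if_pos hab, hx]
        rw [scanOne_cons c r v _ (by rintro ⟨h1, -⟩; exact hvv.1 h1)]
        rw [pvScan, if_pos hab, hK']
        rw [ih t.length hlen t rfl]
    · -- no '??' window here: both scans advance one character
      have hL : pvScan d (a :: b :: x :: t) = a :: pvScan d (b :: x :: t) := by
        rw [pvScan, if_neg hab]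
      have hR : pvScan (d ++ [(c, r)]) (a :: b :: x :: t)
          = a :: pvScan (d ++ [(c, r)]) (b :: x :: t) := by
        rw [pvScan, if_neg hab]
      have hm : ¬ (a = '?' ∧ (pvScan d (b :: x :: t)).head? = some '?' ∧
          (pvScan d (b :: x :: t)).tail.head? = some c) := by
        rintro ⟨ha, h1, -⟩
        have hb : b ≠ '?' := fun hb => hab ⟨ha, hb⟩
        exact pvScan_head_ne d '?' hvq b (x :: t) hb h1
      rw [hL, scanOne_cons c r a _ hm, hR, ih _ hlen1 _ rfl]

-- ===== VERDICT (by name: the statement is the Claim_ definition above) =====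
set_option maxRecDepth 4000 in
theorem process_trigraph_spec : Claim_equal_process_trigraph := by
  intro str _
  unfold Spec_process_trigraph process_trigraph process_trigraph_alt
  have e1 : ∀ m, scanOne '=' '#' m = pvScan [('=', '#')] m := by
    intro m
    have h := pvStep '=' '#' [] (by decide) (by simp) m
    rwa [pvScan_nil] at h
  have e2 : ∀ m, scanOne '/' '\\' (pvScan [('=', '#')] m) = pvScan [('=', '#'), ('/', '\\')] m :=
    fun m => pvStep '/' '\\' [('=', '#')] (by decide) (by simp) m
  have e3 : ∀ m, scanOne '\'' '^' (pvScan [('=', '#'), ('/', '\\')] m) = pvScan [('=', '#'), ('/', '\\'), ('\'', '^')] m :=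
    fun m => pvStep '\'' '^' [('=', '#'), ('/', '\\')] (by decide) (by simp) m
  have e4 : ∀ m, scanOne '(' '[' (pvScan [('=', '#'), ('/', '\\'), ('\'', '^')] m) = pvScan [('=', '#'), ('/', '\\'), ('\'', '^'), ('(', '[')] m :=
    fun m => pvStep '(' '[' [('=', '#'), ('/', '\\'), ('\'', '^')] (by decide) (by simp) m
  have e5 : ∀ m, scanOne ')' ']' (pvScan [('=', '#'), ('/', '\\'), ('\'', '^'), ('(', '[')] m) = pvScan [('=', '#'), ('/', '\\'), ('\'', '^'), ('(', '['), (')', ']')] m :=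
    fun m => pvStep ')' ']' [('=', '#'), ('/', '\\'), ('\'', '^'), ('(', '[')] (by decide) (by simp) m
  have e6 : ∀ m, scanOne '<' '{' (pvScan [('=', '#'), ('/', '\\'), ('\'', '^'), ('(', '['), (')', ']')] m) = pvScan [('=', '#'), ('/', '\\'), ('\'', '^'), ('(', '['), (')', ']'), ('<', '{')] m :=
    fun m => pvStep '<' '{' [('=', '#'), ('/', '\\'), ('\'', '^'), ('(', '['), (')', ']')] (by decide) (by simp) m
  have e7 : ∀ m, scanOne '>' '}' (pvScan [('=', '#'), ('/', '\\'), ('\'', '^'), ('(', '['), (')', ']'), ('<', '{')] m) = pvScan [('=', '#'), ('/', '\\'), ('\'', '^'), ('(', '['), (')', ']'), ('<', '{'), ('>', '}')] m :=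
    fun m => pvStep '>' '}' [('=', '#'), ('/', '\\'), ('\'', '^'), ('(', '['), (')', ']'), ('<', '{')] (by decide) (by simp) m
  have e8 : ∀ m, scanOne '!' '|' (pvScan [('=', '#'), ('/', '\\'), ('\'', '^'), ('(', '['), (')', ']'), ('<', '{'), ('>', '}')] m) = pvScan [('=', '#'), ('/', '\\'), ('\'', '^'), ('(', '['), (')', ']'), ('<', '{'), ('>', '}'), ('!', '|')] m :=
    fun m => pvStep '!' '|' [('=', '#'), ('/', '\\'), ('\'', '^'), ('(', '['), (')', ']'), ('<', '{'), ('>', '}')] (by decide) (by simp) m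
  have e9 : ∀ m, scanOne '-' '~' (pvScan [('=', '#'), ('/', '\\'), ('\'', '^'), ('(', '['), (')', ']'), ('<', '{'), ('>', '}'), ('!', '|')] m) = pvScan [('=', '#'), ('/', '\\'), ('\'', '^'), ('(', '['), (')', ']'), ('<', '{'), ('>', '}'), ('!', '|'), ('-', '~')] m :=
    fun m => pvStep '-' '~' [('=', '#'), ('/', '\\'), ('\'', '^'), ('(', '['), (')', ']'), ('<', '{'), ('>', '}'), ('!', '|')] (by decide) (by simp) m
  simp only [pvTri, List.foldl_cons, List.foldl_nil, pass0]
  rw [e1, e2, e3, e4, e5, e6, e7, e8, e9]
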